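-- pv_equiv track=rewrite | github.com/Leonnardo17/Trabajo1 | tp3/trabajo-practico definitivo(4).py | char_allow
-- ===== SOURCE A (Python) =====
-- def char_allow (word):
--     special = False
--     for i in range(0,len(word)):
--             verifi = word[i]                                                 #verificando si tienes caracteres validos
--             verifi = verifi.upper()
--             if i == 0:
--                 if verifi == " " or verifi == " " or verifi == "'" or verifi == "&":
--                     special = True
--             if ((verifi < "A" and verifi > "Z") or (verifi < "0" and verifi > "9")) and not(verifi != " " or verifi != "'" or verifi !="&" or verifi != "." ):
--                     special = True
--     return special
-- ===== SOURCE B (Python) =====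
-- def char_allow(word):
--     # The loop's second `if` can never fire (its range test is contradictory),
--     # so only the i == 0 branch matters: a single first-character check.
--     return bool(word) and word[0] in " '&"
-- ===== Notes on version B (the rewrite author's own statement) =====
-- stated objective: simpler
-- what changed: Replaced the O(n) scan (whose second if-condition is contradictory dead code) with a single O(1) check that the first character is a space, apostrophe or ampersand.
import Mathlib
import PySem

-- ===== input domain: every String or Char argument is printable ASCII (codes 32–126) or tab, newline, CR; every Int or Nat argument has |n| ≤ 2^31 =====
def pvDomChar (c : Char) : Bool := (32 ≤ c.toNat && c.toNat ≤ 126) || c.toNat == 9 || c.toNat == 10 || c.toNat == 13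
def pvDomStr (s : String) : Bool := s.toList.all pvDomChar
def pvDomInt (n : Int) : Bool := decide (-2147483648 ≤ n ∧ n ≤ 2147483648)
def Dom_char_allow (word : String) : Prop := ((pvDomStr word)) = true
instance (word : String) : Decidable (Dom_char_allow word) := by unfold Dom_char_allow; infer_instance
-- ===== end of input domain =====

-- B replaces A's whole loop (whose second branch is dead code) by a first-character membership test.

-- ===== PORT A =====
def char_allow (word : String) : Bool :=
  (PySem.List.pyRange 0 (PySem.Str.len word) 1).foldl (fun special i =>
    let verifi := PySem.List.pyGetD word.toList i ' '   -- word[i]; i ∈ range(len) so always in bounds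
    let verifi := PySem.Chars.upperChar verifi
    let special :=
      if i == 0 then
        if verifi == ' ' || verifi == ' ' || verifi == '\'' || verifi == '&' then true else special
      else special
    if ((verifi < 'A' && verifi > 'Z') || (verifi < '0' && verifi > '9')) &&
       !(verifi != ' ' || verifi != '\'' || verifi != '&' || verifi != '.') then true
    else special) false

-- ===== PORT B =====
def char_allow_alt (word : String) : Bool :=
  match word.toList with
  | [] => false
  | c :: _ => (" '&".toList).contains c   -- word[0] in " '&"

-- ===== PRECONDITION & SPEC =====
def Spec_char_allow (word : String) (out : Bool) : Prop := out = char_allow_alt word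
instance (word : String) (out : Bool) : Decidable (Spec_char_allow word out) := by unfold Spec_char_allow; infer_instance

-- ===== CLAIM (what is proved, stated in full; the proofs are below) =====
def Claim_equal_char_allow : Prop := ∀ (word : String), Dom_char_allow word → Spec_char_allow word (char_allow word)

-- ===== LEMMAS AND PROOFS =====

-- the second if-condition of A is contradictory for every character
lemma pv_dead_cond (v : Char) :
    ((((v < 'A') && (v > 'Z')) || ((v < '0') && (v > '9'))) &&
     !(v != ' ' || v != '\'' || v != '&' || v != '.')) = false := by
  by_cases h : v = ' ' <;> simp [h]

-- A's loop body, named for the proofs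
def pvStep (word : String) (special : Bool) (i : Int) : Bool :=
  let verifi := PySem.List.pyGetD word.toList i ' '
  let verifi := PySem.Chars.upperChar verifi
  let special :=
    if i == 0 then
      if verifi == ' ' || verifi == ' ' || verifi == '\'' || verifi == '&' then true else special
    else special
  if ((verifi < 'A' && verifi > 'Z') || (verifi < '0' && verifi > '9')) &&
     !(verifi != ' ' || verifi != '\'' || verifi != '&' || verifi != '.') then true
  else special

lemma pv_char_allow_eq_foldl_step (word : String) :
    char_allow word = (PySem.List.pyRange 0 (PySem.Str.len word) 1).foldl (pvStep word) false := rfl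

-- indices ≥ 1 never change the accumulator
lemma pv_tail_const (word : String) (l : List Int) (h : ∀ i ∈ l, i ≠ 0) (s : Bool) :
    l.foldl (pvStep word) s = s := by
  induction l generalizing s with
  | nil => rfl
  | cons i l ih =>
    have hi : i ≠ 0 := h i (List.mem_cons_self ..)
    rw [List.foldl_cons]
    have hstep : pvStep word s i = s := by
      simp only [pvStep, pv_dead_cond, beq_iff_eq, hi, Bool.false_eq_true, if_false]
    rw [hstep]
    exact ih (fun j hj => h j (List.mem_cons_of_mem _ hj)) s

-- the i = 0 test agrees with B's membership test
lemma pv_upper_mem (c : Char) :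
    (PySem.Chars.upperChar c == ' ' || PySem.Chars.upperChar c == ' ' ||
     PySem.Chars.upperChar c == '\'' || PySem.Chars.upperChar c == '&') =
    (" '&".toList).contains c := by
  have hs : (" '&".toList) = [' ', '\'', '&'] := by decide
  rw [hs]
  simp only [PySem.Chars.upperChar]
  split_ifs with h
  · simp only [PySem.Chars.islower, Bool.and_eq_true, decide_eq_true_eq, Char.le_def] at h
    have h1 : 97 ≤ c.toNat ∧ c.toNat ≤ 122 := ⟨h.1, h.2⟩
    have hv : (c.toNat - 32).isValidChar := Or.inl (by omega)
    have hu : (Char.ofNat (c.toNat - 32)).toNat = c.toNat - 32 := by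
      rw [Char.toNat_ofNat]; simp [hv]
    have A1 : Char.ofNat (c.toNat - 32) ≠ ' ' := fun he => by
      have := congrArg Char.toNat he; rw [hu] at this; simp at this; omega
    have A2 : Char.ofNat (c.toNat - 32) ≠ '\'' := fun he => by
      have := congrArg Char.toNat he; rw [hu] at this; simp at this; omega
    have A3 : Char.ofNat (c.toNat - 32) ≠ '&' := fun he => by
      have := congrArg Char.toNat he; rw [hu] at this; simp at this; omega
    have B1 : c ≠ ' ' := fun he => by have := congrArg Char.toNat he; simp at this; omega
    have B2 : c ≠ '\'' := fun he => by have := congrArg Char.toNat he; simp at this; omega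
    have B3 : c ≠ '&' := fun he => by have := congrArg Char.toNat he; simp at this; omega
    simp [A1, A2, A3, B1, B2, B3]
  · simp only [List.contains_cons, List.contains_nil, Bool.or_false]
    have : ∀ a b d : Bool, (a || a || b || d) = (a || (b || d)) := by decide
    exact this _ _ _

-- ===== VERDICT (by name: the statement is the Claim_ definition above) =====
theorem char_allow_spec : Claim_equal_char_allow := by
  intro word _
  unfold Spec_char_allow char_allow_alt
  rw [pv_char_allow_eq_foldl_step]
  cases hw : word.toList with
  | nil =>
    have hlen : PySem.Str.len word = 0 := by
      rw [PySem.Str.len_eq, hw]; rfl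
    rw [hlen, PySem.List.pyRange_one_eq_nil (by omega)]
    rfl
  | cons c cs =>
    have hlen : PySem.Str.len word = (cs.length : Int) + 1 := by
      rw [PySem.Str.len_eq, hw]; simp
    rw [hlen, PySem.List.pyRange_one_cons (by omega), List.foldl_cons]
    have h0 : pvStep word false 0 =
        (PySem.Chars.upperChar c == ' ' || PySem.Chars.upperChar c == ' ' ||
         PySem.Chars.upperChar c == '\'' || PySem.Chars.upperChar c == '&') := by
      simp only [pvStep, hw, PySem.List.pyGetD_zero_cons, pv_dead_cond, Bool.false_eq_true, if_false,
        beq_self_eq_true, if_true, Bool.if_false_right]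
      cases (PySem.Chars.upperChar c == ' ' || PySem.Chars.upperChar c == ' ' ||
         PySem.Chars.upperChar c == '\'' || PySem.Chars.upperChar c == '&') <;> simp
    rw [h0, pv_tail_const word _ (fun i hi => by
      have := (PySem.List.mem_pyRange_one).mp hi; omega)]
    rw [pv_upper_mem]
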